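-- pv_equiv track=rewrite | github.com/acornaeology/acorn-nfs | generate_421_variant_1.py | group_logical_statements
-- ===== SOURCE A (Python) =====
-- def group_logical_statements(lines):
--     """Group lines into logical statements, tracking open parentheses.
--
--     Returns list of (start_line_idx, end_line_idx_exclusive, lines_list).
--     Multi-line function calls (where parens aren't balanced) are grouped
--     together.
--     """
--     groups = []
--     current_start = 0
--     current_lines = []
--     paren_depth = 0
--
--     for i, line in enumerate(lines):
--         current_lines.append(line)
--
--         in_s = None
--         escaped = False
--         comment_stripped = []
--         for j, ch in enumerate(line):
--             if in_s is None:
--                 if ch == '#':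
--                     break
--                 if ch in ('"', "'"):
--                     if line[j:j+3] in ('"""', "'''"):
--                         in_s = line[j:j+3]
--                     else:
--                         in_s = ch
--                 comment_stripped.append(ch)
--             else:
--                 comment_stripped.append(ch)
--                 if not escaped:
--                     if len(in_s) == 3 and line[j:j+3] == in_s:
--                         in_s = None
--                     elif len(in_s) == 1 and ch == in_s:
--                         in_s = None
--                     elif ch == '\\':
--                         escaped = True
--                         continue
--                 escaped = False
--
--         for ch in comment_stripped:
--             if ch == '(':
--                 paren_depth += 1
--             elif ch == ')':
--                 paren_depth -= 1
--
--         if paren_depth <= 0: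
--             paren_depth = 0
--             groups.append((current_start, i + 1, current_lines))
--             current_start = i + 1
--             current_lines = []
--
--     if current_lines:
--         groups.append((current_start, current_start + len(current_lines),
--                        current_lines))
--
--     return groups
-- ===== SOURCE B (Python) =====
-- def _line_delta(line):
--     """Net '(' minus ')' count of the line truncated at the first '#' outside a string."""
--     delta = 0
--     in_s = None
--     escaped = False
--     j = 0
--     n = len(line)
--     while j < n:
--         ch = line[j]
--         if in_s is None:
--             if ch == '#':
--                 return delta
--             if ch == '(':
--                 delta += 1
--             elif ch == ')':
--                 delta -= 1
--             elif ch in ('"', "'"):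
--                 in_s = line[j:j+3] if line[j:j+3] in ('"""', "'''") else ch
--         else:
--             if ch == '(':
--                 delta += 1
--             elif ch == ')':
--                 delta -= 1
--             if not escaped:
--                 if len(in_s) == 3 and line[j:j+3] == in_s:
--                     in_s = None
--                 elif len(in_s) == 1 and ch == in_s:
--                     in_s = None
--                 elif ch == '\\':
--                     escaped = True
--                     j += 1
--                     continue
--             escaped = False
--         j += 1
--     return delta
--
-- def group_logical_statements(lines):
--     """Group lines into logical statements, tracking open parentheses.
--
--     Group-at-a-time: repeatedly scan forward from the current start until the
--     running paren depth (fresh 0 per group) drops to <= 0, emit that slice,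
--     and restart; a trailing never-balanced suffix forms the last group.
--     """
--     groups = []
--     idx = 0
--     n = len(lines)
--     while idx < n:
--         depth = 0
--         end = None
--         for k in range(idx, n):
--             depth += _line_delta(lines[k])
--             if depth <= 0:
--                 end = k + 1
--                 break
--         if end is None:
--             groups.append((idx, n, lines[idx:]))
--             break
--         groups.append((idx, end, lines[idx:end]))
--         idx = end
--     return groups
-- ===== Notes on version B (the rewrite author's own statement) =====
-- stated objective: alternative
-- what changed: A runs one stateful fold over all lines (accumulating the current group's lines, a clamped running paren depth, and a materialized comment-stripped char list per line); B segments group-at-a-time: from each group start it scans forward with a fresh depth 0 until the depth drops to <= 0, emits that slice of lines, and restarts after it, computing each line's net paren delta directly in the comment/string scanner without building a stripped list and never clamping.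
import Mathlib
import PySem

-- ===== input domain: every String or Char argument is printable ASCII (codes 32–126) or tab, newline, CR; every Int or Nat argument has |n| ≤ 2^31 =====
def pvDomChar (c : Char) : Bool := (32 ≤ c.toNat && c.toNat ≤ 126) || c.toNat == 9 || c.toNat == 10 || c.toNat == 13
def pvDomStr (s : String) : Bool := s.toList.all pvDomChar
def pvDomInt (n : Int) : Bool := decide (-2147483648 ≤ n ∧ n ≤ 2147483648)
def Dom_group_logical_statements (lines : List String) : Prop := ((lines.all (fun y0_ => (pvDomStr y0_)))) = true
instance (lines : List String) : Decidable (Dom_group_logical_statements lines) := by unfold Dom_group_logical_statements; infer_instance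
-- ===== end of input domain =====

-- B replaces A's single stateful fold (clamped running depth, accumulated current
-- group) by group-at-a-time segmentation: scan forward from each group start with a
-- fresh depth 0 until it drops to <= 0, emit that slice, restart; per line the net
-- paren delta is computed directly by the comment/string scanner without building a
-- stripped list. Same return value (objective: alternative).


-- ===== PORT A =====
-- A's inner per-character loop: the chars of `line` up to the first '#' outside a
-- string literal (state: in_s, escaped); built in order (Python appends at the end).
def pvStripComment : List Char → Option (List Char) → Bool → List Char
  | [], _, _ => []
  | ch :: rest, none, _ =>
    if ch = '#' then []
    else
      let in_s : Option (List Char) :=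
        if ch = '"' ∨ ch = '\'' then
          if (ch :: rest).take 3 = ['"','"','"'] ∨ (ch :: rest).take 3 = ['\'','\'','\''] then
            some ((ch :: rest).take 3)
          else some [ch]
        else none
      ch :: pvStripComment rest in_s false
  | ch :: rest, some s, escaped =>
    ch ::
      (if escaped then pvStripComment rest (some s) false
       else if s.length = 3 ∧ (ch :: rest).take 3 = s then pvStripComment rest none false
       else if s.length = 1 ∧ [ch] = s then pvStripComment rest none false
       else if ch = '\\' then pvStripComment rest (some s) true
       else pvStripComment rest (some s) false)

def group_logical_statements (lines : List String) : List (Int × Int × List String) :=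
  let st := lines.foldl
    (fun (st : List (Int × Int × List String) × Int × List String × Int × Int) line =>
      let (groups, cur_start, cur_lines, paren_depth, i) := st
      let cur_lines := cur_lines ++ [line]
      let comment_stripped := pvStripComment line.toList none false
      let paren_depth := comment_stripped.foldl
        (fun d ch => if ch = '(' then d + 1 else if ch = ')' then d - 1 else d) paren_depth
      if paren_depth ≤ 0 then
        (groups ++ [(cur_start, i + 1, cur_lines)], i + 1, ([] : List String), 0, i + 1)
      else (groups, cur_start, cur_lines, paren_depth, i + 1))
    ([], 0, [], 0, 0)
  let (groups, cur_start, cur_lines, _, _) := st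
  if cur_lines ≠ [] then groups ++ [(cur_start, cur_start + (cur_lines.length : Int), cur_lines)]
  else groups

-- ===== PORT B =====
-- Source B's _line_delta: the same comment/string scanner, but accumulating the net
-- paren delta directly instead of materializing the stripped characters.
def pvLineDelta : List Char → Option (List Char) → Bool → Int → Int
  | [], _, _, acc => acc
  | ch :: rest, none, _, acc =>
    if ch = '#' then acc
    else
      let acc := if ch = '(' then acc + 1 else if ch = ')' then acc - 1 else acc
      let in_s : Option (List Char) :=
        if ch = '"' ∨ ch = '\'' then
          if (ch :: rest).take 3 = ['"','"','"'] ∨ (ch :: rest).take 3 = ['\'','\'','\''] then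
            some ((ch :: rest).take 3)
          else some [ch]
        else none
      pvLineDelta rest in_s false acc
  | ch :: rest, some s, escaped, acc =>
    let acc := if ch = '(' then acc + 1 else if ch = ')' then acc - 1 else acc
    if escaped then pvLineDelta rest (some s) false acc
    else if s.length = 3 ∧ (ch :: rest).take 3 = s then pvLineDelta rest none false acc
    else if s.length = 1 ∧ [ch] = s then pvLineDelta rest none false acc
    else if ch = '\\' then pvLineDelta rest (some s) true acc
    else pvLineDelta rest (some s) false acc

-- Source B's inner `for k` search: how many lines (from the front of `rest`) the next
-- group spans, i.e. the first point where the running depth drops to <= 0; none if never.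
def pvFindEnd : List String → Int → Option Nat
  | [], _ => none
  | l :: rest, depth =>
    let d := depth + pvLineDelta l.toList none false 0
    if d ≤ 0 then some 1 else (pvFindEnd rest d).map (· + 1)

-- needed by pvSplit's termination
lemma pvFindEnd_bounds : ∀ (rest : List String) (d : Int) (m : Nat),
    pvFindEnd rest d = some m → 1 ≤ m ∧ m ≤ rest.length := by
  intro rest
  induction rest with
  | nil => intro d m h; simp [pvFindEnd] at h
  | cons l t ih =>
    intro d m h
    simp only [pvFindEnd] at h
    split at h
    · injection h with h'; simp; omega
    · rcases Option.map_eq_some_iff.mp h with ⟨k, hk, rfl⟩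
      have := ih _ _ hk
      simp; omega

-- Source B's outer while-loop: emit the next group's slice and restart after it.
def pvSplit : List String → Int → List (Int × Int × List String)
  | [], _ => []
  | l :: rest, idx =>
    match h : pvFindEnd (l :: rest) 0 with
    | none => [(idx, idx + ((l :: rest).length : Int), l :: rest)]
    | some m =>
      (idx, idx + (m : Int), (l :: rest).take m) :: pvSplit ((l :: rest).drop m) (idx + m)
termination_by xs _ => xs.length
decreasing_by
  have := pvFindEnd_bounds _ _ _ h
  simp
  omega

def group_logical_statements_alt (lines : List String) : List (Int × Int × List String) :=
  pvSplit lines 0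

-- ===== PRECONDITION & SPEC =====
def Spec_group_logical_statements (lines : List String) (out : List (Int × Int × List String)) : Prop := out = group_logical_statements_alt lines
instance (lines : List String) (out : List (Int × Int × List String)) : Decidable (Spec_group_logical_statements lines out) := by unfold Spec_group_logical_statements; infer_instance

-- ===== CLAIM (what is proved, stated in full; the proofs are below) =====
def Claim_equal_group_logical_statements : Prop := ∀ (lines : List String), Dom_group_logical_statements lines → Spec_group_logical_statements lines (group_logical_statements lines)

-- ===== LEMMAS AND PROOFS =====

-- A's loop step and final flush, named for the proofs.
def pvStepA (st : List (Int × Int × List String) × Int × List String × Int × Int)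
    (line : String) : List (Int × Int × List String) × Int × List String × Int × Int :=
  let (groups, cur_start, cur_lines, paren_depth, i) := st
  let cur_lines := cur_lines ++ [line]
  let comment_stripped := pvStripComment line.toList none false
  let paren_depth := comment_stripped.foldl
    (fun d ch => if ch = '(' then d + 1 else if ch = ')' then d - 1 else d) paren_depth
  if paren_depth ≤ 0 then
    (groups ++ [(cur_start, i + 1, cur_lines)], i + 1, ([] : List String), 0, i + 1)
  else (groups, cur_start, cur_lines, paren_depth, i + 1)

def pvFinalize (st : List (Int × Int × List String) × Int × List String × Int × Int) :
    List (Int × Int × List String) :=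
  let (groups, cur_start, cur_lines, _, _) := st
  if cur_lines ≠ [] then groups ++ [(cur_start, cur_start + (cur_lines.length : Int), cur_lines)]
  else groups

lemma groupA_eq (lines : List String) :
    group_logical_statements lines = pvFinalize (lines.foldl pvStepA ([], 0, [], 0, 0)) := rfl

-- B's direct delta accumulation equals A's strip-then-count.
lemma delta_eq : ∀ (cs : List Char) (st : Option (List Char)) (esc : Bool) (acc : Int),
    pvLineDelta cs st esc acc
      = acc + (((pvStripComment cs st esc).count '(' : Int)
               - ((pvStripComment cs st esc).count ')' : Int)) := by
  intro cs
  induction cs with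
  | nil => intro st esc acc; cases st <;> simp [pvLineDelta, pvStripComment]
  | cons ch rest ih =>
    intro st esc acc
    cases st with
    | none =>
      simp only [pvLineDelta, pvStripComment]
      split
      · simp
      · rw [ih]
        simp [List.count_cons]
        split_ifs <;> simp_all <;> ring
    | some s =>
      simp only [pvLineDelta, pvStripComment]
      split_ifs <;> rw [ih] <;> simp [List.count_cons] <;> split_ifs <;>
        simp_all <;> ring

-- A's char-by-char paren counting equals adding the net delta.
lemma paren_foldl_eq (cs : List Char) (d : Int) :
    cs.foldl (fun d ch => if ch = '(' then d + 1 else if ch = ')' then d - 1 else d) d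
      = d + ((cs.count '(' : Int) - (cs.count ')' : Int)) := by
  induction cs generalizing d with
  | nil => simp
  | cons ch rest ihc =>
    simp only [List.foldl_cons, List.count_cons, ihc]
    by_cases h1 : ch = '(' <;> by_cases h2 : ch = ')' <;> simp [h1, h2] <;> omega

-- one A-step changes the depth by the line's pvLineDelta
lemma stepA_depth (line : String) (d : Int) :
    (pvStripComment line.toList none false).foldl
        (fun d ch => if ch = '(' then d + 1 else if ch = ')' then d - 1 else d) d
      = d + pvLineDelta line.toList none false 0 := by
  rw [paren_foldl_eq, delta_eq]; ring

-- Bridge: A's fold continued from mid-group state versus B's boundary search.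
lemma bridge : ∀ (rest : List String) (G : List (Int × Int × List String)) (s : Int)
    (cur : List String) (depth : Int),
    pvFinalize (rest.foldl pvStepA (G, s, cur, depth, s + (cur.length : Int)))
      = match pvFindEnd rest depth with
        | none =>
          if cur ++ rest ≠ [] then
            G ++ [(s, s + ((cur ++ rest).length : Int), cur ++ rest)]
          else G
        | some m =>
          pvFinalize ((rest.drop m).foldl pvStepA
            (G ++ [(s, s + (cur.length : Int) + (m : Int), cur ++ rest.take m)],
             s + (cur.length : Int) + (m : Int), [], 0,
             s + (cur.length : Int) + (m : Int))) := by
  intro rest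
  induction rest with
  | nil =>
    intro G s cur depth
    simp only [List.foldl_nil, pvFindEnd, pvFinalize, List.append_nil]
  | cons l t ih =>
    intro G s cur depth
    simp only [List.foldl_cons, pvFindEnd]
    have hstep : pvStepA (G, s, cur, depth, s + (cur.length : Int)) l
        = if depth + pvLineDelta l.toList none false 0 ≤ 0 then
            (G ++ [(s, s + (cur.length : Int) + 1, cur ++ [l])],
             s + (cur.length : Int) + 1, ([] : List String), 0, s + (cur.length : Int) + 1)
          else (G, s, cur ++ [l], depth + pvLineDelta l.toList none false 0,
                s + (cur.length : Int) + 1) := by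
      simp only [pvStepA, stepA_depth]
    rw [hstep]
    by_cases hd : depth + pvLineDelta l.toList none false 0 ≤ 0
    · simp [hd]
    · simp only [hd, if_false]
      have h2 : s + (cur.length : Int) + 1 = s + ((cur ++ [l]).length : Int) := by
        simp; ring
      rw [h2, ih G s (cur ++ [l]) (depth + pvLineDelta l.toList none false 0)]
      cases hfe : pvFindEnd t (depth + pvLineDelta l.toList none false 0) with
      | none => simp
      | some m =>
        simp only [Option.map_some]
        have hgrp : cur ++ [l] ++ t.take m = cur ++ (l :: t).take (m + 1) := by
          simp [List.take_succ_cons]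
        have hlen : s + ((cur ++ [l]).length : Int) + (m : Int)
            = s + (cur.length : Int) + ((m + 1 : Nat) : Int) := by
          simp; ring
        rw [List.drop_succ_cons]
        rw [hgrp, hlen]

-- Main: A's fold from a fresh group state equals G ++ B's segmentation.
lemma main_eq : ∀ (n : Nat) (rest : List String), rest.length ≤ n →
    ∀ (G : List (Int × Int × List String)) (s : Int),
      pvFinalize (rest.foldl pvStepA (G, s, [], 0, s)) = G ++ pvSplit rest s := by
  intro n
  induction n with
  | zero =>
    intro rest hlen G s
    have : rest = [] := List.length_eq_zero_iff.mp (Nat.le_zero.mp hlen)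
    subst this
    simp [pvSplit, pvFinalize]
  | succ n ih =>
    intro rest hlen G s
    have hb := bridge rest G s [] 0
    simp only [List.length_nil, Int.natCast_zero, add_zero, List.nil_append] at hb
    rw [hb]
    cases rest with
    | nil => simp [pvFindEnd, pvSplit]
    | cons l t =>
      cases hfe : pvFindEnd (l :: t) 0 with
      | none =>
        rw [pvSplit, hfe]
        simp
      | some m =>
        have hbd := pvFindEnd_bounds _ _ _ hfe
        have hdrop : ((l :: t).drop m).length ≤ n := by
          simp at hbd hlen ⊢; omega
        change pvFinalize (List.foldl pvStepA
            (G ++ [(s, s + (m : Int), List.take m (l :: t))], s + (m : Int), [], 0,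
             s + (m : Int)) (List.drop m (l :: t))) = G ++ pvSplit (l :: t) s
        rw [ih _ hdrop]
        rw [pvSplit, hfe]
        simp

-- ===== VERDICT (by name: the statement is the Claim_ definition above) =====
theorem group_logical_statements_spec : Claim_equal_group_logical_statements := by
  intro lines _
  unfold Spec_group_logical_statements group_logical_statements_alt
  rw [groupA_eq]
  have := main_eq lines.length lines le_rfl [] 0
  simpa using this
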